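-- pv_equiv track=rewrite | github.com/yasidainsika/Innodata | GPT_project/Extract_References/test_2.py | clean_references
-- ===== SOURCE A (Python) =====
-- def clean_references(raw_references):
--     cleaned_references = []
--     current_reference = ""
--
--     # Define irrelevant phrases or sentences to be removed
--     irrelevant_phrases = [
--         "Here are the extracted references", "There are no references", "The text appears",
--         "This is a self-contained passage", "The text does not contain any citations",
--         "https://", "http://", "Please provide the text", "I'll be happy to extract the references for you",
--         "There is no text above"
--     ]
--
--     for reference in raw_references:
--         reference = reference.strip()
--
--         # Check for irrelevant content
--         if not any(phrase in reference for phrase in irrelevant_phrases) and len(reference) > 10 and any(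
--                 char.isalpha() for char in reference):
--
--             # Check if the line seems to start a new reference (often starts with a digit or reference number)
--             if any(char.isdigit() for char in reference) and not reference.startswith("There is no"):
--                 if current_reference:
--                     cleaned_references.append(current_reference.strip())
--                 current_reference = reference
--             else:
--                 # Append to the current reference if it continues on a new line
--                 current_reference += " " + reference
--
--     # Append the last reference if it exists
--     if current_reference:
--         cleaned_references.append(current_reference.strip())
--
--     return cleaned_references
-- ===== SOURCE B (Python) =====
-- IRRELEVANT_PHRASES = [
--     "Here are the extracted references", "There are no references", "The text appears",
--     "This is a self-contained passage", "The text does not contain any citations",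
--     "https://", "http://", "Please provide the text", "I'll be happy to extract the references for you",
--     "There is no text above"
-- ]
--
--
-- def _keep(line):
--     return (not any(p in line for p in IRRELEVANT_PHRASES)
--             and len(line) > 10
--             and any(c.isalpha() for c in line))
--
--
-- def _starts(line):
--     return any(c.isdigit() for c in line) and not line.startswith("There is no")
--
--
-- def _build(ls):
--     # recursively peel off one reference group: the head line plus every
--     # following line up to (not including) the next group-starting line
--     if not ls:
--         return []
--     i = 1
--     while i < len(ls) and not _starts(ls[i]):
--         i += 1
--     return [" ".join(ls[:i]).strip()] + _build(ls[i:])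
--
--
-- def clean_references(raw_references):
--     return _build([s for s in (r.strip() for r in raw_references) if _keep(s)])
-- ===== Notes on version B (the rewrite author's own statement) =====
-- stated objective: alternative
-- what changed: A makes one pass threading a running concatenated-string accumulator with flush-on-boundary logic; B filters the stripped lines and then recursively peels off one group at a time, scanning ahead with a while loop for the next group-starting line and slicing the list, joining each slice at the end.
import Mathlib
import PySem

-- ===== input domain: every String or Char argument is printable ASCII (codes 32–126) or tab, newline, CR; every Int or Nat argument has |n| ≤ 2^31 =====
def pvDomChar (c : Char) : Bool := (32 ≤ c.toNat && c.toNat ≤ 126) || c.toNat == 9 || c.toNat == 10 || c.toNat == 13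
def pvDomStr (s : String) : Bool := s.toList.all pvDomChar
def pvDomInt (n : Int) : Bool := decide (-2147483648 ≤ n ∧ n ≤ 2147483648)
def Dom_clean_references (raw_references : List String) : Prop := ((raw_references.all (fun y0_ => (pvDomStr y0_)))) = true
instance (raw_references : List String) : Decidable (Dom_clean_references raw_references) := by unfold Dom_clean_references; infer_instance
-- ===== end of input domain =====

-- B replaces A's single pass with a running string accumulator by filter → recursive scan-ahead grouping with list slices (objective: alternative).

-- ===== PORT A =====
def pvPhrasesA : List String :=
  ["Here are the extracted references", "There are no references", "The text appears",
   "This is a self-contained passage", "The text does not contain any citations",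
   "https://", "http://", "Please provide the text",
   "I'll be happy to extract the references for you", "There is no text above"]

def pvStepA (st : List String × String) (reference : String) : List String × String :=
  let reference := PySem.Str.strip reference
  if (!(pvPhrasesA.any (fun phrase => PySem.Str.isIn phrase reference)))
      && decide (10 < PySem.Str.len reference)
      && reference.toList.any PySem.Chars.isalpha then
    if reference.toList.any PySem.Chars.isdigit
        && !(PySem.Str.startswith reference "There is no") then
      if st.2 ≠ "" then (st.1 ++ [PySem.Str.strip st.2], reference) else (st.1, reference)
    else
      (st.1, st.2 ++ " " ++ reference)
  else st

def clean_references (raw_references : List String) : List String :=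
  let st := raw_references.foldl pvStepA ([], "")
  if st.2 ≠ "" then st.1 ++ [PySem.Str.strip st.2] else st.1

-- ===== PORT B =====
def pvIrrelevantPhrases : List String :=
  ["Here are the extracted references", "There are no references", "The text appears",
   "This is a self-contained passage", "The text does not contain any citations",
   "https://", "http://", "Please provide the text",
   "I'll be happy to extract the references for you", "There is no text above"]

def pvKeep (line : String) : Bool :=
  (!(pvIrrelevantPhrases.any (fun p => PySem.Str.isIn p line)))
    && decide (10 < PySem.Str.len line)
    && line.toList.any PySem.Chars.isalpha

def pvStarts (line : String) : Bool :=
  line.toList.any PySem.Chars.isdigit && !(PySem.Str.startswith line "There is no")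

-- the while loop 'while i < len(ls) and not _starts(ls[i]): i += 1'; the loop index
-- is a Nat since it starts at 1 and only increments; ls[i] with 0 ≤ i < len(ls) is
-- exactly Lean's in-range indexing.
def pvScan (ls : List String) (i : Nat) : Nat :=
  if h : i < ls.length then
    if !pvStarts ls[i] then pvScan ls (i + 1) else i
  else i
termination_by ls.length - i

-- the while loop never moves the index backwards (needed for _build's termination)
lemma pvScan_ge (ls : List String) (i : Nat) : i ≤ pvScan ls i := by
  rw [pvScan]
  split
  · split
    · exact Nat.le_trans (Nat.le_succ i) (pvScan_ge ls (i + 1))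
    · exact Nat.le_refl i
  · exact Nat.le_refl i
termination_by ls.length - i

-- Python's local 'i = <while-loop result>' is substituted at its two use sites
def pvBuild (ls : List String) : List String :=
  if _h : ls = [] then []
  else
    PySem.Str.strip (PySem.Str.join " " (PySem.List.slice ls none (some ((pvScan ls 1 : Nat) : Int)))) ::
      pvBuild (PySem.List.slice ls (some ((pvScan ls 1 : Nat) : Int)) none)
termination_by ls.length
decreasing_by
  simp only [PySem.List.slice_from_natCast, List.length_drop]
  have h1 := pvScan_ge ls 1
  have h2 : 0 < ls.length := List.length_pos_iff.mpr _h
  omega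

def clean_references_alt (raw_references : List String) : List String :=
  pvBuild ((raw_references.map PySem.Str.strip).filter pvKeep)

-- ===== PRECONDITION & SPEC =====
def Spec_clean_references (raw_references : List String) (out : List String) : Prop := out = clean_references_alt raw_references
instance (raw_references : List String) (out : List String) : Decidable (Spec_clean_references raw_references out) := by unfold Spec_clean_references; infer_instance

-- ===== CLAIM (what is proved, stated in full; the proofs are below) =====
def Claim_equal_clean_references : Prop := ∀ (raw_references : List String), Dom_clean_references raw_references → Spec_clean_references raw_references (clean_references raw_references)

-- ===== LEMMAS AND PROOFS =====

-- A's loop body without the strip/keep wrapper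
def pvCoreA (st : List String × String) (reference : String) : List String × String :=
  if reference.toList.any PySem.Chars.isdigit
      && !(PySem.Str.startswith reference "There is no") then
    if st.2 ≠ "" then (st.1 ++ [PySem.Str.strip st.2], reference) else (st.1, reference)
  else
    (st.1, st.2 ++ " " ++ reference)

def pvRender (g : List String) : String := PySem.Str.strip (PySem.Str.join " " g)

def pvFinishA (st : List String × String) : List String :=
  if st.2 ≠ "" then st.1 ++ [PySem.Str.strip st.2] else st.1

-- reference grouping as a recursive takeWhile/dropWhile decomposition, the common
-- characterisation both ports are proved equal to
def pvGroups : List String → List (List String)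
  | [] => []
  | l :: rest =>
      (l :: rest.takeWhile (fun x => !pvStarts x)) ::
        pvGroups (rest.dropWhile (fun x => !pvStarts x))
termination_by ls => ls.length
decreasing_by
  have := List.length_dropWhile_le (fun x => !pvStarts x) rest
  simp only [List.length_cons]
  omega

lemma pvStepA_eq (st : List String × String) (r : String) :
    pvStepA st r = if pvKeep (PySem.Str.strip r) then pvCoreA st (PySem.Str.strip r) else st := by
  rfl

lemma pvJoin_cons_ne (l0 : String) (rest : List String) (h : l0 ≠ "") :
    PySem.Str.join " " (l0 :: rest) ≠ "" := by
  intro he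
  apply h
  apply String.toList_inj.mp
  have h2 := congrArg String.toList he
  rw [PySem.Str.toList_join] at h2
  cases rest with
  | nil => simpa [PySem.Chars.join_singleton] using h2
  | cons q qs =>
    rw [List.map_cons, List.map_cons, PySem.Chars.join_cons_cons] at h2
    simp only [String.toList_empty, List.append_eq_nil_iff, List.append_assoc] at h2
    simp [h2.1]

lemma pvJoin_concat (l0 l : String) (rest : List String) :
    PySem.Str.join " " ((l0 :: rest) ++ [l]) = PySem.Str.join " " (l0 :: rest) ++ " " ++ l := by
  apply String.toList_inj.mp
  simp only [PySem.Str.toList_join, String.toList_append]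
  induction rest generalizing l0 with
  | nil => simp [PySem.Chars.join_cons_cons, PySem.Chars.join_singleton]
  | cons q qs ih =>
    simp only [List.cons_append, List.map_cons, PySem.Chars.join_cons_cons]
    rw [show PySem.Chars.join " ".toList (q.toList :: List.map String.toList (qs ++ [l]))
        = PySem.Chars.join " ".toList (q.toList :: List.map String.toList qs) ++ " ".toList ++ l.toList from by
      have := ih q; simpa using this]
    simp

lemma pvStrip_pre (pre s : String) (hpre : pre = "" ∨ pre = " ") :
    PySem.Str.strip (pre ++ s) = PySem.Str.strip s := by
  rcases hpre with h | h <;> subst h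
  · simp
  · apply String.toList_inj.mp
    simp only [PySem.Str.toList_strip, String.toList_append]
    rw [show (" ".toList) = [' '] from rfl]
    simp [PySem.Chars.strip, PySem.Chars.lstrip, PySem.Chars.isspace]

lemma pvKeep_ne_empty (l : String) (h : pvKeep l = true) : l ≠ "" := by
  intro he; subst he
  simp [pvKeep] at h

lemma pvPre_join_ne (pre j : String) (hj : j ≠ "") : pre ++ j ≠ "" := by
  intro he
  apply hj
  apply String.toList_inj.mp
  have h2 := congrArg String.toList he
  simp only [String.toList_append, String.toList_empty, List.append_eq_nil_iff] at h2
  simp [h2.2]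

lemma pvFoldA_filter (l : List String) (st : List String × String) :
    l.foldl pvStepA st = ((l.map PySem.Str.strip).filter pvKeep).foldl pvCoreA st := by
  induction l generalizing st with
  | nil => rfl
  | cons a tl ih =>
    simp only [List.foldl_cons, List.map_cons, List.filter_cons, pvStepA_eq]
    by_cases hk : pvKeep (PySem.Str.strip a) = true
    · rw [if_pos hk, if_pos hk, List.foldl_cons, ih]
    · rw [if_neg hk, if_neg (by simpa using hk), ih]

-- the while loop finds exactly the end of the leading run of non-starting lines
lemma pvScan_spec (done rest : List String) :
    pvScan (done ++ rest) done.length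
      = done.length + (rest.takeWhile (fun x => !pvStarts x)).length := by
  induction rest generalizing done with
  | nil =>
    rw [pvScan]
    simp
  | cons x xs ih =>
    rw [pvScan]
    have hlt : done.length < (done ++ x :: xs).length := by simp
    rw [dif_pos hlt]
    have hget : (done ++ x :: xs)[done.length] = x := by
      rw [List.getElem_append_right (Nat.le_refl _)]
      simp
    rw [hget]
    by_cases hs : pvStarts x = true
    · rw [if_neg (by simp [hs]), List.takeWhile_cons, if_neg (by simp [hs])]
      simp
    · have hs' : (!pvStarts x) = true := by simp [Bool.eq_false_iff.mpr hs]
      rw [if_pos hs', List.takeWhile_cons, if_pos hs']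
      have := ih (done ++ [x])
      simp only [List.append_assoc, List.cons_append, List.nil_append,
        List.length_append, List.length_cons, List.length_nil] at this ⊢
      rw [show done.length + 1 = done.length + 1 + 0 from rfl] at this ⊢
      simpa [Nat.add_assoc, Nat.add_comm, Nat.add_left_comm] using this

lemma pvBuild_eq (ls : List String) : pvBuild ls = (pvGroups ls).map pvRender := by
  match ls with
  | [] => rw [pvBuild, pvGroups]; simp
  | l :: rest =>
    rw [pvBuild, pvGroups, dif_neg (by simp : ¬(l :: rest = []))]
    have hscan : pvScan (l :: rest) 1
        = 1 + (rest.takeWhile (fun x => !pvStarts x)).length := by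
      have := pvScan_spec [l] rest
      simpa using this
    have htake : rest.take (rest.takeWhile (fun x => !pvStarts x)).length
        = rest.takeWhile (fun x => !pvStarts x) :=
      ((List.prefix_iff_eq_take).mp (List.takeWhile_prefix _)).symm
    have hdrop : rest.drop (rest.takeWhile (fun x => !pvStarts x)).length
        = rest.dropWhile (fun x => !pvStarts x) := by
      have hsplit := List.takeWhile_append_dropWhile (p := fun x => !pvStarts x) (l := rest)
      calc rest.drop (rest.takeWhile (fun x => !pvStarts x)).length
          = (rest.takeWhile (fun x => !pvStarts x)
              ++ rest.dropWhile (fun x => !pvStarts x)).drop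
              (rest.takeWhile (fun x => !pvStarts x)).length := by rw [hsplit]
        _ = rest.dropWhile (fun x => !pvStarts x) := List.drop_left
    rw [PySem.List.slice_to_natCast, PySem.List.slice_from_natCast, hscan, Nat.add_comm,
      List.take_succ_cons, htake, List.drop_succ_cons, hdrop,
      pvBuild_eq (rest.dropWhile (fun x => !pvStarts x))]
    rfl
termination_by ls.length
decreasing_by
  have := List.length_dropWhile_le (fun x => !pvStarts x) rest
  simp only [List.length_cons]
  omega

-- the invariant run of A's loop: acc already-rendered groups, current group (l0 :: g)
-- held as pre ++ join, pre ∈ {"", " "}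
lemma pvFoldCont (ls : List String) (acc : List String) (l0 : String) (g : List String)
    (pre : String) (hl : ∀ y ∈ ls, y ≠ "") (hl0 : l0 ≠ "") (hpre : pre = "" ∨ pre = " ") :
    pvFinishA (ls.foldl pvCoreA (acc, pre ++ PySem.Str.join " " (l0 :: g))) =
      acc ++ pvRender ((l0 :: g) ++ ls.takeWhile (fun x => !pvStarts x)) ::
        (pvGroups (ls.dropWhile (fun x => !pvStarts x))).map pvRender := by
  induction ls generalizing acc l0 g pre with
  | nil =>
    simp only [List.foldl_nil, List.takeWhile_nil, List.dropWhile_nil, List.append_nil]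
    have hne : pre ++ PySem.Str.join " " (l0 :: g) ≠ "" :=
      pvPre_join_ne _ _ (pvJoin_cons_ne _ _ hl0)
    unfold pvFinishA
    rw [if_pos hne]
    rw [show PySem.Str.strip (pre ++ PySem.Str.join " " (l0 :: g)) = pvRender (l0 :: g) from by
      unfold pvRender; rw [pvStrip_pre _ _ hpre]]
    rw [pvGroups]
    simp
  | cons x xs ih =>
    have hxne : x ≠ "" := hl x (by simp)
    have hxs : ∀ y ∈ xs, y ≠ "" := fun y hy => hl y (by simp [hy])
    simp only [List.foldl_cons]
    have hne : pre ++ PySem.Str.join " " (l0 :: g) ≠ "" :=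
      pvPre_join_ne _ _ (pvJoin_cons_ne _ _ hl0)
    by_cases hc : (x.toList.any PySem.Chars.isdigit
        && !(PySem.Str.startswith x "There is no")) = true
    · have hs : pvStarts x = true := hc
      have hx0 : ("" : String) ++ PySem.Str.join " " [x] = x := by
        apply String.toList_inj.mp
        simp [PySem.Str.toList_join, PySem.Chars.join_singleton]
      rw [show pvCoreA (acc, pre ++ PySem.Str.join " " (l0 :: g)) x
          = (acc ++ [pvRender (l0 :: g)], "" ++ PySem.Str.join " " (x :: [])) from by
        unfold pvCoreA
        simp only []
        rw [if_pos hc, if_pos hne, hx0]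
        unfold pvRender
        rw [pvStrip_pre _ _ hpre]]
      rw [ih _ _ _ _ hxs hxne (Or.inl rfl)]
      rw [List.takeWhile_cons, if_neg (by simp [hs]), List.dropWhile_cons, if_neg (by simp [hs]),
        pvGroups]
      simp
    · have hs : pvStarts x = false := by
        have : ¬ pvStarts x = true := hc
        simpa using this
      have hc2 : pre ++ PySem.Str.join " " (l0 :: g) ++ " " ++ x
          = pre ++ PySem.Str.join " " (l0 :: (g ++ [x])) := by
        rw [show l0 :: (g ++ [x]) = (l0 :: g) ++ [x] from rfl, pvJoin_concat]
        apply String.toList_inj.mp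
        simp
      rw [show pvCoreA (acc, pre ++ PySem.Str.join " " (l0 :: g)) x
          = (acc, pre ++ PySem.Str.join " " (l0 :: (g ++ [x]))) from by
        unfold pvCoreA
        simp only []
        rw [if_neg hc, hc2]]
      rw [ih _ _ _ _ hxs hl0 hpre]
      rw [List.takeWhile_cons, if_pos (by simp [hs]), List.dropWhile_cons, if_pos (by simp [hs])]
      simp

lemma pvMainNew (ls : List String) (hl : ∀ y ∈ ls, y ≠ "") :
    pvFinishA (ls.foldl pvCoreA ([], "")) = (pvGroups ls).map pvRender := by
  cases ls with
  | nil => rw [pvGroups]; rfl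
  | cons l rest =>
    have hlne : l ≠ "" := hl l (by simp)
    have hr : ∀ y ∈ rest, y ≠ "" := fun y hy => hl y (by simp [hy])
    rw [pvGroups]
    simp only [List.foldl_cons]
    have hl0 : ("" : String) ++ PySem.Str.join " " [l] = l := by
      apply String.toList_inj.mp
      simp [PySem.Str.toList_join, PySem.Chars.join_singleton]
    by_cases hc : (l.toList.any PySem.Chars.isdigit
        && !(PySem.Str.startswith l "There is no")) = true
    · rw [show pvCoreA ([], "") l = ([], "" ++ PySem.Str.join " " [l]) from by
        unfold pvCoreA
        simp only []
        rw [if_pos hc, if_neg (by simp : ¬("" : String) ≠ ""), hl0]]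
      rw [pvFoldCont rest [] l [] "" hr hlne (Or.inl rfl)]
      simp
    · have hsp : (" " : String) ++ PySem.Str.join " " [l] = "" ++ " " ++ l := by
        apply String.toList_inj.mp
        simp [PySem.Str.toList_join, PySem.Chars.join_singleton]
      rw [show pvCoreA ([], "") l = ([], " " ++ PySem.Str.join " " [l]) from by
        unfold pvCoreA
        simp only []
        rw [if_neg hc, hsp]]
      rw [pvFoldCont rest [] l [] " " hr hlne (Or.inr rfl)]
      simp

-- ===== VERDICT (by name: the statement is the Claim_ definition above) =====
theorem clean_references_spec : Claim_equal_clean_references := by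
  intro raw _
  unfold Spec_clean_references clean_references clean_references_alt
  rw [pvFoldA_filter, pvBuild_eq]
  exact pvMainNew _ (fun x hx => pvKeep_ne_empty x (List.of_mem_filter hx))
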